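-- pv_equiv track=rewrite | github.com/alexpaden/ditti-bot | ditti/commands/gpt.py | find_integer_after_caret
-- ===== SOURCE A (Python) =====
-- def find_integer_after_caret(s: str) -> int:
--     caret_index = s.find("^")
--     if caret_index == -1:
--         return 0
--     elif caret_index == len(s) - 1:
--         return -1
--
--     for i in range(caret_index + 1, len(s)):
--         if s[i] == " ":
--             break
--         elif not s[i].isdigit():
--             return -1
--
--     integer_str = s[caret_index + 1 : i]
--     if integer_str == "":
--         return 1
--
--     return int(integer_str)
-- ===== SOURCE B (Python) =====
-- def find_integer_after_caret(s: str) -> int: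
--     caret_index = s.find("^")
--     if caret_index == -1:
--         return 0
--     if caret_index == len(s) - 1:
--         return -1
--     segment = s[caret_index + 1:].split(" ", 1)[0]
--     if segment == "":
--         return 1
--     if not segment.isdigit():
--         return -1
--     return int(segment)
-- ===== Notes on version B (the rewrite author's own statement) =====
-- stated objective: idiomatic
-- what changed: Replaces the explicit per-character index loop (with its leaked loop variable and manual slice) by a split-then-classify decomposition: take the text after the caret up to the first space with str.split(' ', 1), classify it with isdigit, and convert it with int.
-- intended difference: On strings where the first '^' is not the last character and everything after it up to the end of the string is digits (so no space ends the scan), A's leaked loop index stops at the last index and A returns the integer of the run with its final digit dropped (or 1 for a single-digit run), while B returns the integer value of the whole digit run, the intended parse; runs equal to '1' or all-zero runs of two or more digits, where the two values coincide, lie outside D_. — e.g. on find_integer_after_caret("^25"): A returns 2, B returns 25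
import Mathlib
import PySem

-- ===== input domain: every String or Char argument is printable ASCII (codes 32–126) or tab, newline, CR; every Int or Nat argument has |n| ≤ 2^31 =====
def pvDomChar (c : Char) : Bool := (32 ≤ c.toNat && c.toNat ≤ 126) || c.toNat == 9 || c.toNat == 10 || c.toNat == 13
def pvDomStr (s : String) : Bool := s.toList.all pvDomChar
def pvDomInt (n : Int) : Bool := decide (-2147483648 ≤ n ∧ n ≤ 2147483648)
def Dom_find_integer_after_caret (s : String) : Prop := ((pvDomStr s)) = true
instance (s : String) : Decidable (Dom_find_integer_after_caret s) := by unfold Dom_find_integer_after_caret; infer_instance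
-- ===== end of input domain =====

-- B replaces A's per-character index loop by a split(" ", 1)[0]-then-classify
-- decomposition; where the digit run after the first '^' reaches the end of the string,
-- A's leaked loop index drops the run's final digit and B parses the whole run (D_).

-- int(x) on the nonempty all-digit strings both programs feed it (A's loop and B's
-- isdigit guard ensure this) is exactly this decimal fold; both ports use it there.
def pvIntOfDigits (l : List Char) : Int :=
  l.foldl (fun a c => 10 * a + ((c.toNat : Int) - 48)) 0

-- ===== PORT A =====
-- A's for-loop 'for i in range(i0, n)' with n = len(s): none = the early 'return -1';
-- some i = the value of the loop variable i after a break / normal completion.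
-- fuel is n - i, so it never runs out on the calls made; cs.getD i 'x' is s[i]
-- (i < n = cs.length on every call, so the default is never read).
def pvLoopAux (cs : List Char) (n : Nat) : Nat → Nat → Option Nat
  | 0, _ => none   -- unreachable: every call has fuel = n - i > 0
  | fuel + 1, i =>
    let ch := cs.getD i 'x'
    if ch == ' ' then some i
    else if !PySem.Chars.isdigit ch then none
    else if i + 1 < n then pvLoopAux cs n fuel (i + 1) else some i

def pvLoopA (cs : List Char) (n i : Nat) : Option Nat := pvLoopAux cs n (n - i) i

def find_integer_after_caret (s : String) : Int :=
  let cs := s.toList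
  let caret_index := PySem.Str.find s "^"
  if caret_index == -1 then 0
  else if caret_index == (cs.length : Int) - 1 then -1
  else
    match pvLoopA cs cs.length (caret_index.toNat + 1) with
    | none => -1                                     -- 'return -1' from inside the loop
    | some i =>
      let integer_str := PySem.List.slice cs (some (caret_index + 1)) (some (i : Int))
      if integer_str = [] then 1
      else pvIntOfDigits integer_str   -- int(integer_str): all digits by the loop's checks

-- ===== PORT B =====
def find_integer_after_caret_alt (s : String) : Int :=
  let cs := s.toList
  let caret_index := PySem.Str.find s "^"
  if caret_index == -1 then 0
  else if caret_index == (cs.length : Int) - 1 then -1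
  else
    -- s[caret_index + 1:].split(" ", 1)[0]  (split always yields a nonempty list, so
    -- the [0] is total and .headD [] never reads its default)
    let rest := PySem.List.slice cs (some (caret_index + 1)) none
    let segment := (PySem.Chars.splitOnMax rest [' '] 1).headD []
    if segment = [] then 1
    else if !PySem.Chars.strIsdigit segment then -1
    else pvIntOfDigits segment   -- int(segment): all digits by the isdigit guard

-- ===== PRECONDITION & SPEC =====
-- On strings where the first '^' is not the last character and everything after it up
-- to the end is digits (no space ends the scan), A's leaked loop index stops at the
-- last index, so A returns the integer of the run with its final digit dropped (or 1
-- for a single digit) while B returns the integer value of the whole run, the intended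
-- parse; the runs "1" and all-zero runs of two or more digits, where the two values
-- coincide, are outside D_.
def D_find_integer_after_caret (s : String) : Prop :=
  let t := s.toList.drop (s.toList.idxOf '^' + 1)
  '^' ∈ s.toList ∧ t ≠ [] ∧ t.all PySem.Chars.isdigit ∧ t ≠ ['1'] ∧
    ¬ (2 ≤ t.length ∧ t.all (· == '0'))
instance (s : String) : Decidable (D_find_integer_after_caret s) := by
  unfold D_find_integer_after_caret; infer_instance

def Spec_find_integer_after_caret (s : String) (out : Int) : Prop :=
  ¬ D_find_integer_after_caret s → out = find_integer_after_caret_alt s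
instance (s : String) (out : Int) : Decidable (Spec_find_integer_after_caret s out) := by
  unfold Spec_find_integer_after_caret; infer_instance

def pvDiffWitness_find_integer_after_caret : String := "^25"
def pvDiffWitnessOut_find_integer_after_caret : Int × Int := (2, 25)

-- ===== CLAIM (what is proved, stated in full; the proofs are below) =====
def Claim_unchanged_find_integer_after_caret : Prop :=
  ∀ (s : String), Dom_find_integer_after_caret s →
    Spec_find_integer_after_caret s (find_integer_after_caret s)
def Claim_changed_find_integer_after_caret : Prop :=
  Dom_find_integer_after_caret (pvDiffWitness_find_integer_after_caret) ∧
  D_find_integer_after_caret (pvDiffWitness_find_integer_after_caret) ∧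
  find_integer_after_caret (pvDiffWitness_find_integer_after_caret) = pvDiffWitnessOut_find_integer_after_caret.1 ∧
  find_integer_after_caret_alt (pvDiffWitness_find_integer_after_caret) = pvDiffWitnessOut_find_integer_after_caret.2 ∧
  pvDiffWitnessOut_find_integer_after_caret.1 ≠ pvDiffWitnessOut_find_integer_after_caret.2
def Claim_exact_find_integer_after_caret : Prop :=
  ∀ (s : String), Dom_find_integer_after_caret s → D_find_integer_after_caret s →
    find_integer_after_caret s ≠ find_integer_after_caret_alt s

-- ===== LEMMAS AND PROOFS =====

-- The scan A's loop performs, on the tail list t = cs.drop i: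
-- none = a non-digit non-space char was hit; some r = the relative offset of the
-- loop variable at exit (break at a space, or r = t.length - 1 on normal completion).
def pvScan : List Char → Option Nat
  | [] => none
  | ch :: t =>
    if ch == ' ' then some 0
    else if !PySem.Chars.isdigit ch then none
    else match t with
         | [] => some 0
         | _ :: _ => (pvScan t).map (· + 1)

theorem pvScan_single (ch : Char) :
    pvScan [ch] = if ch == ' ' then some 0 else if !PySem.Chars.isdigit ch then none else some 0 := rfl

theorem pvScan_cons_cons (ch a : Char) (t : List Char) :
    pvScan (ch :: a :: t) = if ch == ' ' then some 0 else if !PySem.Chars.isdigit ch then none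
      else (pvScan (a :: t)).map (· + 1) := rfl

theorem pv_digit_ne_space {ch : Char} (hd : PySem.Chars.isdigit ch = true) : ¬ (ch == ' ') = true := by
  intro hc
  rw [show ch = ' ' from by simpa using hc] at hd
  simp [PySem.Chars.isdigit] at hd

theorem pvLoopAux_eq_scan (cs : List Char) : ∀ (d i : Nat), i < cs.length → cs.length - i = d →
    pvLoopAux cs cs.length d i = (pvScan (cs.drop i)).map (i + ·) := by
  intro d
  induction d with
  | zero => intro i h hd; omega
  | succ d ih =>
    intro i h hd
    rw [List.drop_eq_getElem_cons h]
    simp only [pvLoopAux, pvScan, List.getD_eq_getElem?_getD, List.getElem?_eq_getElem h,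
      Option.getD_some]
    by_cases hsp : cs[i] == ' '
    · simp [hsp]
    · simp only [hsp]
      by_cases hdig : !PySem.Chars.isdigit cs[i]
      · simp [hdig]
      · simp only [hdig]
        by_cases hlt : i + 1 < cs.length
        · rw [if_pos hlt, ih (i+1) hlt (by omega)]
          have hne : cs.drop (i+1) ≠ [] := by
            simp [List.drop_eq_nil_iff]; omega
          cases hcs : cs.drop (i+1) with
          | nil => exact absurd hcs hne
          | cons a t =>
            cases pvScan (a :: t) <;> simp; omega
        · rw [if_neg hlt]
          have hnil : cs.drop (i+1) = [] := by simp [List.drop_eq_nil_iff]; omega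
          simp [hnil]

theorem pvLoopA_eq_scan (cs : List Char) (i : Nat) (h : i < cs.length) :
    pvLoopA cs cs.length i = (pvScan (cs.drop i)).map (i + ·) :=
  pvLoopAux_eq_scan cs (cs.length - i) i h rfl

theorem pvScan_all_digits (t : List Char) (ht : t ≠ [])
    (h : t.all PySem.Chars.isdigit = true) : pvScan t = some (t.length - 1) := by
  induction t with
  | nil => exact absurd rfl ht
  | cons ch t ih =>
    simp only [List.all_cons, Bool.and_eq_true] at h
    have hd := h.1
    have hsp := pv_digit_ne_space hd
    cases t with
    | nil => simp [pvScan_single, hsp, hd]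
    | cons a t' =>
      rw [pvScan_cons_cons, if_neg hsp, hd]
      rw [ih (by simp) h.2]
      simp

theorem pvScan_stop (t : List Char) (h : t.all PySem.Chars.isdigit = false) :
    pvScan t =
      if t.getD ((t.takeWhile PySem.Chars.isdigit).length) 'x' == ' '
      then some ((t.takeWhile PySem.Chars.isdigit).length) else none := by
  induction t with
  | nil => simp at h
  | cons ch t ih =>
    by_cases hd : PySem.Chars.isdigit ch
    · have hsp := pv_digit_ne_space hd
      simp only [List.all_cons, hd, Bool.true_and] at h
      have ht : t ≠ [] := by rintro rfl; simp at h
      cases t with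
      | nil => exact absurd rfl ht
      | cons a t' =>
        rw [pvScan_cons_cons, if_neg hsp, hd]
        rw [ih h]
        simp only [List.takeWhile_cons, hd, if_true, List.length_cons, List.getD_cons_succ]
        split <;> simp_all
    · cases t with
      | nil =>
        simp only [pvScan_single, List.takeWhile_cons, hd]
        by_cases hsp : ch == ' ' <;> simp [hsp, hd]
      | cons a t' =>
        rw [pvScan_cons_cons]
        simp only [List.takeWhile_cons, hd]
        by_cases hsp : ch == ' ' <;> simp [hsp, hd]

-- B's first split piece is takeWhile (· ≠ ' ').
theorem splitOnMax_go_head (fuel : Nat) : ∀ (t cur : List Char), t.length < fuel →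
    (PySem.Chars.splitOnMax.go [' '] fuel 1 t cur []).headD [] =
      cur.reverse ++ t.takeWhile (fun ch => !(ch == ' ')) := by
  induction fuel with
  | zero => intro t cur h; omega
  | succ fuel ih =>
    intro t cur h
    cases t with
    | nil => simp [PySem.Chars.splitOnMax.go]
    | cons c rest =>
      rw [PySem.Chars.splitOnMax.go]
      simp only [List.takeWhile_cons]
      by_cases hsp : c == ' '
      · have hpre : List.isPrefixOf [' '] (c :: rest) = true := by
          simp [List.isPrefixOf]; exact (by simpa using hsp : c = ' ').symm
        simp only [if_neg (by omega : ¬ (1 = 0)), hpre, if_true]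
        cases fuel with
        | zero => simp at h
        | succ f =>
          cases rest <;> simp [PySem.Chars.splitOnMax.go, hsp]
      · have hpre : List.isPrefixOf [' '] (c :: rest) = false := by
          simp [List.isPrefixOf]; exact fun hc => (by simpa using hsp : ¬ c = ' ') hc.symm
        simp only [if_neg (by omega : ¬ (1 = 0)), hpre, Bool.false_eq_true, if_false, hsp]
        rw [ih rest (c :: cur) (by simpa using Nat.lt_of_succ_lt_succ h)]
        simp

theorem segment_eq_takeWhile (t : List Char) :
    (PySem.Chars.splitOnMax t [' '] 1).headD [] = t.takeWhile (fun ch => !(ch == ' ')) := by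
  rw [PySem.Chars.splitOnMax]
  rw [if_neg (by omega : ¬ ((1:Int) < 0))]
  simpa using splitOnMax_go_head (t.length + 1) t [] (by omega)

theorem takeWhile_ne_space_of_space (t : List Char)
    (h : t.all PySem.Chars.isdigit = false)
    (hsp : t.getD ((t.takeWhile PySem.Chars.isdigit).length) 'x' = ' ') :
    t.takeWhile (fun ch => !(ch == ' ')) = t.takeWhile PySem.Chars.isdigit := by
  induction t with
  | nil => simp at h
  | cons ch t ih =>
    by_cases hd : PySem.Chars.isdigit ch
    · simp only [List.all_cons, hd, Bool.true_and] at h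
      simp only [List.takeWhile_cons, hd, if_true, List.length_cons, List.getD_cons_succ] at hsp ⊢
      rw [if_pos (by simpa using pv_digit_ne_space hd), ih h hsp]
    · simp only [List.takeWhile_cons, hd, if_false, List.length_nil, List.getD_cons_zero] at hsp ⊢
      subst hsp
      simp

theorem segment_all_digits_false (t : List Char)
    (h : t.all PySem.Chars.isdigit = false)
    (hsp : ¬ t.getD ((t.takeWhile PySem.Chars.isdigit).length) 'x' = ' ') :
    (t.takeWhile (fun ch => !(ch == ' '))).all PySem.Chars.isdigit = false := by
  induction t with
  | nil => simp at h
  | cons ch t ih =>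
    by_cases hd : PySem.Chars.isdigit ch
    · simp only [List.all_cons, hd, Bool.true_and] at h
      simp only [List.takeWhile_cons, hd, if_true, List.length_cons, List.getD_cons_succ] at hsp ⊢
      rw [if_pos (by simpa using pv_digit_ne_space hd)]
      simp [hd, ih h hsp]
    · simp only [List.takeWhile_cons, hd, if_false, List.length_nil, List.getD_cons_zero] at hsp ⊢
      rw [if_pos (by simpa using fun hc : (ch == ' ') = true => hsp (by simpa using hc))]
      simp [hd]

-- the first non-digit position of a not-all-digit list is a real index
theorem takeWhile_length_lt (t : List Char) (h : t.all PySem.Chars.isdigit = false) :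
    (t.takeWhile PySem.Chars.isdigit).length < t.length := by
  have hpre := List.takeWhile_prefix (l := t) (p := PySem.Chars.isdigit)
  rcases Nat.lt_or_ge (t.takeWhile PySem.Chars.isdigit).length t.length with hlt | hge
  · exact hlt
  · exfalso
    have hle := hpre.length_le
    have heq : t.takeWhile PySem.Chars.isdigit = t := hpre.eq_of_length (by omega)
    have : t.all PySem.Chars.isdigit = true := by
      rw [← heq]; exact List.all_takeWhile
    simp [this] at h

-- idxOf is the least index holding c
theorem pv_idxOf_spec (c : Char) : ∀ (cs : List Char) (t : Nat), t < cs.length →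
    cs[t]? = some c → (∀ j, j < t → cs[j]? ≠ some c) → cs.idxOf c = t := by
  intro cs
  induction cs with
  | nil => intro t ht; simp at ht
  | cons a l ih =>
    intro t ht hc hmin
    by_cases ha : a = c
    · have : t = 0 := by
        by_contra hne
        exact hmin 0 (by omega) (by simp [ha])
      subst this ha
      simp
    · have ht0 : t ≠ 0 := by
        intro h0; subst h0; simp at hc; exact ha hc
      obtain ⟨t', rfl⟩ : ∃ t', t = t' + 1 := ⟨t - 1, by omega⟩
      have : l.idxOf c = t' := by
        apply ih t' (by simpa using ht) (by simpa using hc)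
        intro j hj hcj
        exact hmin (j + 1) (by omega) (by simpa using hcj)
      simp [ha, this]

-- PySem.Chars.find on a singleton needle computes idxOf (when the char occurs)
theorem pv_find_toNat_eq_idxOf (cs : List Char) (c : Char)
    (h : 0 ≤ PySem.Chars.find cs [c]) :
    (PySem.Chars.find cs [c]).toNat = cs.idxOf c ∧ c ∈ cs := by
  obtain ⟨hpre, hmin⟩ := PySem.Chars.find_spec h
  set t := (PySem.Chars.find cs [c]).toNat with hT
  obtain ⟨u, hu⟩ := hpre
  have hu' : cs.drop t = c :: u := by simpa using hu.symm
  have htlt : t < cs.length := by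
    have : cs.drop t ≠ [] := by rw [hu']; simp
    rw [ne_eq, List.drop_eq_nil_iff] at this; omega
  have hget : cs[t]? = some c := by
    have h0 : (cs.drop t)[0]? = some c := by rw [hu']; rfl
    rwa [List.getElem?_drop, Nat.add_zero] at h0
  have hmem : c ∈ cs := by
    obtain ⟨hlt, he⟩ := List.getElem?_eq_some_iff.mp hget
    exact he ▸ List.getElem_mem _
  refine ⟨(pv_idxOf_spec c cs t htlt hget ?_).symm, hmem⟩
  intro j hj hcj
  have hjlt : j < cs.length := by omega
  apply hmin j hj
  refine ⟨(cs.drop j).tail, ?_⟩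
  have hcj' : cs[j] = c := (List.getElem?_eq_some_iff.mp hcj).2
  rw [List.drop_eq_getElem_cons hjlt, hcj']
  rfl

-- digit arithmetic for pvIntOfDigits
theorem pv_isdigit_iff (c : Char) : PySem.Chars.isdigit c = true ↔ 48 ≤ c.toNat ∧ c.toNat ≤ 57 := by
  rw [PySem.Chars.isdigit]
  rw [Bool.and_eq_true, decide_eq_true_iff, decide_eq_true_iff, Char.le_def, Char.le_def,
    UInt32.le_iff_toNat_le, UInt32.le_iff_toNat_le]
  exact Iff.rfl

theorem pv_char_of_toNat {c : Char} (d : Char) (h : c.toNat = d.toNat) : c = d :=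
  Char.ext (UInt32.toNat_inj.mp h)

theorem pv_fold_ge : ∀ (l : List Char) (a : Int), l.all PySem.Chars.isdigit = true → 0 ≤ a →
    a ≤ l.foldl (fun a c => 10 * a + ((c.toNat : Int) - 48)) a := by
  intro l
  induction l with
  | nil => intro a _ _; simp
  | cons c l ih =>
    intro a hall ha
    simp only [List.all_cons, Bool.and_eq_true] at hall
    obtain ⟨h48, _⟩ := (pv_isdigit_iff c).mp hall.1
    have hstep : a ≤ 10 * a + ((c.toNat : Int) - 48) := by omega
    calc a ≤ 10 * a + ((c.toNat : Int) - 48) := hstep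
      _ ≤ _ := by
        simpa using ih (10 * a + ((c.toNat : Int) - 48)) hall.2 (by omega)

theorem pv_fold_zeros : ∀ (l : List Char), l.all (· == '0') = true →
    l.foldl (fun a c => 10 * a + ((c.toNat : Int) - 48)) 0 = 0 := by
  intro l
  induction l with
  | nil => simp
  | cons c l ih =>
    intro hall
    simp only [List.all_cons, Bool.and_eq_true, beq_iff_eq] at hall
    obtain ⟨rfl, h2⟩ := hall
    simpa using ih h2

theorem pv_fold_eq_zero (l : List Char) (hall : l.all PySem.Chars.isdigit = true)
    (h : l.foldl (fun a c => 10 * a + ((c.toNat : Int) - 48)) 0 = 0) :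
    l.all (· == '0') = true := by
  induction l with
  | nil => rfl
  | cons c l ih =>
    simp only [List.all_cons, Bool.and_eq_true] at hall ⊢
    obtain ⟨h48, h57⟩ := (pv_isdigit_iff c).mp hall.1
    simp only [List.foldl_cons, mul_zero, zero_add] at h
    have hge := pv_fold_ge l ((c.toNat : Int) - 48) hall.2 (by omega)
    have hc0 : (c.toNat : Int) - 48 = 0 := by omega
    have hc : c = '0' := pv_char_of_toNat '0' (by
      have h0 : '0'.toNat = 48 := rfl
      omega)
    subst hc
    refine ⟨by simp, ih hall.2 (by simpa [hc0] using h)⟩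

-- both ports evaluated when everything after the caret is a digit
theorem pv_eval_digits (s : String) (k : Nat)
    (hk : PySem.Chars.find s.toList ['^'] = (k : Int))
    (hk1 : k + 1 < s.toList.length)
    (hall : (s.toList.drop (k + 1)).all PySem.Chars.isdigit = true) :
    find_integer_after_caret s =
      (if (s.toList.drop (k + 1)).dropLast = [] then 1
       else pvIntOfDigits (s.toList.drop (k + 1)).dropLast) ∧
    find_integer_after_caret_alt s = pvIntOfDigits (s.toList.drop (k + 1)) := by
  have h1 : ¬ ((k : Int) = -1) := by omega
  have h2 : ¬ ((k : Int) = (s.toList.length : Int) - 1) := by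
    have : k + 1 < s.toList.length := hk1
    omega
  have htne : s.toList.drop (k + 1) ≠ [] := by
    rw [ne_eq, List.drop_eq_nil_iff]; omega
  have hslice_from : PySem.List.slice s.toList (some ((k : Int) + 1)) none
      = s.toList.drop (k + 1) := by
    rw [show ((k : Int) + 1) = ((k + 1 : Nat) : Int) by push_cast; ring,
        PySem.List.slice_from _ (by positivity)]
    simp
  unfold find_integer_after_caret find_integer_after_caret_alt
  simp only [PySem.Str.find_eq, show ("^" : String).toList = ['^'] from rfl, hk, beq_iff_eq]
  rw [if_neg h1, if_neg h2, if_neg h1, if_neg h2]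
  simp only [Int.toNat_natCast]
  rw [pvLoopA_eq_scan _ _ hk1, hslice_from, segment_eq_takeWhile]
  constructor
  · rw [pvScan_all_digits _ htne hall]
    simp only [Option.map_some]
    rw [show ((k : Int) + 1) = ((k + 1 : Nat) : Int) by push_cast; ring]
    rw [show (((k + 1 + ((s.toList.drop (k + 1)).length - 1) : Nat)) : Int)
        = (((k + 1 + ((s.toList.drop (k + 1)).length - 1) : Nat)) : Int) from rfl]
    rw [PySem.List.slice_natCast]
    rw [show k + 1 + ((s.toList.drop (k + 1)).length - 1) - (k + 1)
        = (s.toList.drop (k + 1)).length - 1 by omega]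
    rw [← List.dropLast_eq_take]
  · have hseg : (s.toList.drop (k + 1)).takeWhile (fun ch => !(ch == ' '))
        = s.toList.drop (k + 1) :=
      List.takeWhile_eq_self_iff.mpr (fun x hx => by
        simpa using pv_digit_ne_space (List.all_eq_true.mp hall x hx))
    rw [hseg]
    have hsd : PySem.Chars.strIsdigit (s.toList.drop (k + 1)) = true := by
      simp [PySem.Chars.strIsdigit, htne, hall]
    rw [if_neg htne, hsd]
    simp

-- the main equivalence outside D_
theorem pv_main (s : String) (hnd : ¬ D_find_integer_after_caret s) :
    find_integer_after_caret s = find_integer_after_caret_alt s := by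
  by_cases h1 : PySem.Chars.find s.toList ['^'] = -1
  · unfold find_integer_after_caret find_integer_after_caret_alt
    simp only [PySem.Str.find_eq, show ("^" : String).toList = ['^'] from rfl]
    simp [h1]
  · have hge : 0 ≤ PySem.Chars.find s.toList ['^'] := by
      have := PySem.Chars.neg_one_le_find s.toList ['^']; omega
    obtain ⟨hidx, hmem⟩ := pv_find_toNat_eq_idxOf s.toList '^' hge
    obtain ⟨k, hk⟩ : ∃ k : Nat, PySem.Chars.find s.toList ['^'] = ↑k :=
      ⟨_, (Int.toNat_of_nonneg hge).symm⟩
    have hkidx : s.toList.idxOf '^' = k := by rw [← hidx, hk, Int.toNat_natCast]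
    have hklen : k < s.toList.length := by
      rw [← hkidx]; exact List.idxOf_lt_length_of_mem hmem
    by_cases h2 : PySem.Chars.find s.toList ['^'] = (s.toList.length : Int) - 1
    · unfold find_integer_after_caret find_integer_after_caret_alt
      simp only [PySem.Str.find_eq, show ("^" : String).toList = ['^'] from rfl]
      simp [h2]
    · have hk1 : k + 1 < s.toList.length := by
        rw [hk] at h2
        have : k ≠ s.toList.length - 1 := by intro he; apply h2; omega
        omega
      by_cases hall : (s.toList.drop (k + 1)).all PySem.Chars.isdigit = true
      · -- everything after the caret is a digit: ¬D_ leaves only the coinciding runs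
        obtain ⟨hA, hB⟩ := pv_eval_digits s k hk hk1 hall
        rw [hA, hB]
        have htne0 : s.toList.drop (k + 1) ≠ [] := by
          rw [ne_eq, List.drop_eq_nil_iff]; omega
        have hcase : s.toList.drop (k + 1) = ['1'] ∨
            (2 ≤ (s.toList.drop (k + 1)).length ∧ (s.toList.drop (k + 1)).all (· == '0') = true) := by
          by_contra hcon
          push_neg at hcon
          exact hnd ⟨hmem, by rw [hkidx]; exact htne0, by rw [hkidx]; exact hall,
            by rw [hkidx]; exact hcon.1, by rw [hkidx]; exact fun h2' => hcon.2 h2'.1 h2'.2⟩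
        rcases hcase with hone | ⟨hlen2, hzeros⟩
        · rw [hone]; decide
        · have hdne : (s.toList.drop (k + 1)).dropLast ≠ [] := by
            intro hnil
            have hlen := congrArg List.length hnil
            simp only [List.length_dropLast, List.length_nil] at hlen
            omega
          rw [if_neg hdne]
          have hzeros' : (s.toList.drop (k + 1)).dropLast.all (· == '0') = true := by
            rw [List.all_eq_true] at hzeros ⊢
            exact fun x hx => hzeros x (List.dropLast_subset _ hx)
          unfold pvIntOfDigits
          rw [pv_fold_zeros _ hzeros, pv_fold_zeros _ hzeros']
      · -- a non-digit occurs after the caret: both programs agree on the scan outcome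
        have h1' : ¬ ((k : Int) = -1) := by omega
        have h2' : ¬ ((k : Int) = (s.toList.length : Int) - 1) := by rw [hk] at h2; exact h2
        have htne : s.toList.drop (k + 1) ≠ [] := by
          rw [ne_eq, List.drop_eq_nil_iff]; omega
        have hslice_from : PySem.List.slice s.toList (some ((k : Int) + 1)) none
            = s.toList.drop (k + 1) := by
          rw [show ((k : Int) + 1) = ((k + 1 : Nat) : Int) by push_cast; ring,
              PySem.List.slice_from _ (by positivity)]
          simp
        unfold find_integer_after_caret find_integer_after_caret_alt
        simp only [PySem.Str.find_eq, show ("^" : String).toList = ['^'] from rfl, hk, beq_iff_eq]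
        rw [if_neg h1', if_neg h2', if_neg h1', if_neg h2']
        simp only [Int.toNat_natCast]
        rw [pvLoopA_eq_scan _ _ hk1, hslice_from, segment_eq_takeWhile]
        rw [pvScan_stop _ (by simpa using hall)]
        have hjlt := takeWhile_length_lt _ (by simpa using hall)
        by_cases hspc : (s.toList.drop (k + 1)).getD
            (((s.toList.drop (k + 1)).takeWhile PySem.Chars.isdigit).length) 'x' = ' '
        · -- a space ends the run: both return int(run before the space) (or 1 if empty)
          rw [if_pos (by simpa using hspc)]
          rw [takeWhile_ne_space_of_space _ (by simpa using hall) hspc]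
          simp only [Option.map_some]
          rw [show ((k : Int) + 1) = ((k + 1 : Nat) : Int) by push_cast; ring]
          rw [show ((((k + 1) + (((s.toList.drop (k + 1)).takeWhile PySem.Chars.isdigit).length) : Nat)) : Int)
              = (((k + 1 + ((s.toList.drop (k + 1)).takeWhile PySem.Chars.isdigit).length : Nat)) : Int) from by push_cast; ring]
          rw [PySem.List.slice_natCast]
          have htake : (s.toList.drop (k + 1)).take
              (((s.toList.drop (k + 1)).takeWhile PySem.Chars.isdigit).length)
              = (s.toList.drop (k + 1)).takeWhile PySem.Chars.isdigit :=
            (List.prefix_iff_eq_take.mp (List.takeWhile_prefix _)).symm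
          rw [show k + 1 + (((s.toList.drop (k + 1)).takeWhile PySem.Chars.isdigit).length) - (k + 1)
              = (((s.toList.drop (k + 1)).takeWhile PySem.Chars.isdigit).length) by omega]
          rw [htake]
          by_cases he : (s.toList.drop (k + 1)).takeWhile PySem.Chars.isdigit = []
          · simp [he]
          · have hsd : PySem.Chars.strIsdigit
                ((s.toList.drop (k + 1)).takeWhile PySem.Chars.isdigit) = true := by
              simp [PySem.Chars.strIsdigit, he, List.all_takeWhile]
            rw [hsd]
            simp [he]
        · -- a non-digit, non-space char before any space: both return -1
          rw [if_neg (by simpa using hspc)]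
          simp only [Option.map_none]
          have hsegall := segment_all_digits_false _ (by simpa using hall) hspc
          have hsegne : (s.toList.drop (k + 1)).takeWhile (fun ch => !(ch == ' ')) ≠ [] := by
            intro he; rw [he] at hsegall; simp at hsegall
          have hsd : PySem.Chars.strIsdigit
              ((s.toList.drop (k + 1)).takeWhile (fun ch => !(ch == ' '))) = false := by
            simp [PySem.Chars.strIsdigit, hsegall]
          rw [hsd]
          simp [hsegne]

-- ===== VERDICT (by name: the statements are the Claim_ definitions above) =====
theorem find_integer_after_caret_spec : Claim_unchanged_find_integer_after_caret := by
  intro s _ hnd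
  show find_integer_after_caret s = find_integer_after_caret_alt s
  exact pv_main s hnd

theorem find_integer_after_caret_changed : Claim_changed_find_integer_after_caret := by
  unfold Claim_changed_find_integer_after_caret; decide

theorem find_integer_after_caret_tight : Claim_exact_find_integer_after_caret := by
  intro s _ hD
  obtain ⟨hmem, htne0, hall, hne1, hnz⟩ := hD
  have hk1 : s.toList.idxOf '^' + 1 < s.toList.length := by
    rw [ne_eq, List.drop_eq_nil_iff] at htne0; omega
  obtain ⟨l1, l2, hsplit⟩ := List.append_of_mem hmem
  have hge : 0 ≤ PySem.Chars.find s.toList ['^'] :=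
    (PySem.Chars.find_nonneg_iff _ _).mpr ⟨l1, l2, by rw [hsplit]; simp⟩
  obtain ⟨hidx, _⟩ := pv_find_toNat_eq_idxOf s.toList '^' hge
  have hk : PySem.Chars.find s.toList ['^'] = ((s.toList.idxOf '^' : Nat) : Int) := by
    rw [← hidx, Int.toNat_of_nonneg hge]
  obtain ⟨hA, hB⟩ := pv_eval_digits s (s.toList.idxOf '^') hk hk1 hall
  rw [hA, hB]
  set t := s.toList.drop (s.toList.idxOf '^' + 1) with ht
  have htne : t ≠ [] := by
    rw [ht, ne_eq, List.drop_eq_nil_iff]; omega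
  have hlast : t.dropLast ++ [t.getLast htne] = t := List.dropLast_concat_getLast htne
  have hcmem : t.getLast htne ∈ t := List.getLast_mem htne
  obtain ⟨h48, h57⟩ := (pv_isdigit_iff _).mp (List.all_eq_true.mp hall _ hcmem)
  have hinit_all : t.dropLast.all PySem.Chars.isdigit = true := by
    rw [List.all_eq_true] at hall ⊢
    exact fun x hx => hall x (List.dropLast_subset _ hx)
  have hBval : pvIntOfDigits t
      = 10 * pvIntOfDigits t.dropLast + (((t.getLast htne).toNat : Int) - 48) := by
    unfold pvIntOfDigits
    conv_lhs => rw [← hlast]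
    rw [List.foldl_append]
    rfl
  by_cases hinit : t.dropLast = []
  · -- single digit after the caret: A returns 1, B the digit's value, and the digit is not '1'
    rw [if_pos hinit]
    rw [hBval, hinit]
    intro heq
    unfold pvIntOfDigits at heq
    simp only [List.foldl_nil, mul_zero, zero_add] at heq
    have : (t.getLast htne).toNat = 49 := by omega
    have hc1 : t.getLast htne = '1' := pv_char_of_toNat '1' (by rw [this]; rfl)
    apply hne1
    rw [← hlast, hinit, hc1]
    rfl
  · rw [if_neg hinit]
    rw [hBval]
    intro heq
    have hv0 : 0 ≤ pvIntOfDigits t.dropLast := pv_fold_ge _ 0 hinit_all le_rfl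
    have hveq : pvIntOfDigits t.dropLast = 0 ∧ ((t.getLast htne).toNat : Int) - 48 = 0 := by
      constructor <;> omega
    have hzlast : t.getLast htne = '0' := pv_char_of_toNat '0' (by
      have := hveq.2
      have h0 : '0'.toNat = 48 := rfl
      omega)
    have hzinit : t.dropLast.all (· == '0') = true :=
      pv_fold_eq_zero _ hinit_all hveq.1
    apply hnz
    constructor
    · have : t.dropLast.length + 1 = t.length := by
        conv_rhs => rw [← hlast]
        simp
      have hdl : 1 ≤ t.dropLast.length := by
        rcases Nat.eq_zero_or_pos t.dropLast.length with h0 | h1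
        · exact absurd (List.length_eq_zero_iff.mp h0) hinit
        · exact h1
      omega
    · rw [← hlast, List.all_append, hzinit, hzlast]
      simp
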